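-- pv_equiv track=rewrite | github.com/Werberus/SpecialistPython1 | Module5/practice/repeat/09_task_repeat.py | check_fruits
-- ===== SOURCE A (Python) =====
-- def check_fruits(fruits):
--     count = 0
--     char = set()
--     for fruit in fruits:
--         count_new = 0
--         for fruit2 in fruits:
--             if not fruit2 == fruits:
--                 if fruit.upper()[0] == fruit2.upper()[0]:
--                     count_new += 1
--         if count_new > count:
--             count = count_new
--             char = set()
--             char.add(fruit.upper()[0])
--         elif count_new == count:
--             char.add(fruit.upper()[0])
--     return char
-- ===== SOURCE B (Python) =====
-- def check_fruits(fruits):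
--     letters = [f.upper()[0] for f in fruits]
--     counts = {}
--     for l in letters:
--         counts[l] = counts.get(l, 0) + 1
--     if not counts:
--         return set()
--     best = max(counts.values())
--     return {l for l in letters if counts[l] == best}
-- ===== Notes on version B (the rewrite author's own statement) =====
-- stated objective: faster
-- what changed: A rescans the whole fruit list once per fruit while keeping a running max with set resets; B makes one pass building a dict tally of first letters, takes the max of the tallies, and returns the letters that reach it.
import Mathlib
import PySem

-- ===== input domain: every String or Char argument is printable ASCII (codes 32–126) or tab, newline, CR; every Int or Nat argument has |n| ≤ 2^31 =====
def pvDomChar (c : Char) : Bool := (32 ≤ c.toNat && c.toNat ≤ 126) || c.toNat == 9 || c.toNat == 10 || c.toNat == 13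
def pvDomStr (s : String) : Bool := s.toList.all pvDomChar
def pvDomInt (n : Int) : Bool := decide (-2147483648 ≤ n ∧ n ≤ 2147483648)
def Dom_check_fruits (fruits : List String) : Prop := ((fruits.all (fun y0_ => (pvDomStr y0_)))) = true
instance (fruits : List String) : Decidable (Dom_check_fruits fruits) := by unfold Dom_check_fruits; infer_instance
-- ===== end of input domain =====

-- B replaces A's rescan-of-all-fruits-per-fruit with a single dict tally over the first letters
-- (objective: faster). Return value only; neither program mutates its argument.

-- ===== PORT A =====

-- fruit.upper()[0]: a 1-character Python str; String.ofList wraps the Char from Str.pyGet?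
-- back into a String (exact). Default "" is unreachable under Pre_ (every fruit nonempty).
def pvFirstUpper (f : String) : String :=
  match PySem.Str.pyGet? (PySem.Str.upper f) 0 with
  | some c => String.ofList [c]
  | none => ""

def check_fruits (fruits : List String) : List String :=
  (fruits.foldl (fun (st : Int × PySem.Set String) fruit =>
      -- 'if not fruit2 == fruits': a str never equals a list, so the guard is always True
      let countNew : Int := fruits.foldl (fun cn fruit2 =>
          if pvFirstUpper fruit == pvFirstUpper fruit2 then cn + 1 else cn) 0
      if countNew > st.1 then (countNew, PySem.Set.add PySem.Set.empty (pvFirstUpper fruit))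
      else if countNew == st.1 then (st.1, PySem.Set.add st.2 (pvFirstUpper fruit))
      else st)
    ((0 : Int), (PySem.Set.empty : PySem.Set String))).2

-- ===== PORT B =====
def check_fruits_alt (fruits : List String) : List String :=
  let letters := fruits.map pvFirstUpper
  let counts := letters.foldl
    (fun (d : PySem.Dict String Int) l => d.insert l (d.getD l 0 + 1)) PySem.Dict.empty
  match PySem.List.max? counts.values (fun v => v) with
  | none => PySem.Set.empty            -- 'if not counts: return set()'
  | some best =>
      -- counts[l]: l is always a key of counts, so getD's default 0 is never read
      letters.foldl (fun (s : PySem.Set String) l =>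
        if counts.getD l 0 == best then PySem.Set.add s l else s) PySem.Set.empty

-- ===== PRECONDITION & SPEC =====
-- Pre_ excludes lists containing an empty string: there fruit.upper()[0] raises IndexError in A (and in B too).
def Pre_check_fruits (fruits : List String) : Prop := ∀ f ∈ fruits, f.toList ≠ []
instance (fruits : List String) : Decidable (Pre_check_fruits fruits) := by
  unfold Pre_check_fruits; infer_instance

def pvWitness_check_fruits : List String := ["apple", "Avocado", "banana", "pear", "plum"]

def Spec_check_fruits (fruits : List String) (out : List String) : Prop := out = check_fruits_alt fruits
instance (fruits : List String) (out : List String) : Decidable (Spec_check_fruits fruits out) := by unfold Spec_check_fruits; infer_instance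

-- ===== CLAIM (what is proved, stated in full; the proofs are below) =====
def Claim_equal_check_fruits : Prop := ∀ (fruits : List String), Dom_check_fruits fruits → Pre_check_fruits fruits → Spec_check_fruits fruits (check_fruits fruits)

-- ===== LEMMAS AND PROOFS =====

-- a guarded Set.add loop is Set.update with the filtered list
theorem pv_foldl_add_filter {p : String → Bool} (ls : List String) (s : PySem.Set String) :
    ls.foldl (fun s l => if p l then PySem.Set.add s l else s) s
      = PySem.Set.update s (ls.filter p) := by
  induction ls generalizing s with
  | nil => rfl
  | cons l t ih =>
      simp only [List.foldl_cons, List.filter_cons]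
      by_cases h : p l
      · simp [h, ih, PySem.Set.update]
      · simp [h, ih]

-- max over the deduplicated counts equals A's running max of the per-element counts
theorem pv_max_values (ls : List String) (h : ls ≠ []) :
    PySem.List.max? ((PySem.Set.ofList ls).map (fun k => ((ls.count k : Int)))) (fun v => v)
      = some (ls.foldl (fun a x => max a ((ls.count x : Int))) 0) := by
  have hC : ls.foldl (fun a x => max a ((ls.count x : Int))) 0
      = (ls.map (fun x => ((ls.count x : Int)))).foldl max 0 := by
    rw [List.foldl_map]
  obtain ⟨y, ys, rfl⟩ := List.exists_cons_of_ne_nil h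
  have hdne : PySem.Set.ofList (y :: ys) ≠ [] := by
    intro hd
    have := (PySem.Set.mem_ofList (y :: ys) y).mpr (List.mem_cons_self)
    rw [hd] at this; exact List.not_mem_nil this
  obtain ⟨x, t, hd⟩ := List.exists_cons_of_ne_nil hdne
  set ls := y :: ys with hls
  set cnt : String → Int := fun x => ((ls.count x : Int)) with hcnt
  rw [hd, List.map_cons, PySem.List.max?_id_cons]
  congr 1
  have hmem1 : ∀ z ∈ PySem.Set.ofList ls, cnt z ≤ (t.map cnt).foldl max (cnt x) := by
    intro z hz
    rw [hd] at hz
    rcases List.mem_cons.mp hz with rfl | hz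
    · exact (PySem.List.le_foldl_max (t.map cnt) (cnt z)).1
    · exact (PySem.List.le_foldl_max (t.map cnt) (cnt x)).2 _ (List.mem_map_of_mem hz)
  have hmem2 : ∀ z ∈ ls, cnt z ≤ (ls.map cnt).foldl max 0 := by
    intro z hz
    exact (PySem.List.le_foldl_max (ls.map cnt) 0).2 _ (List.mem_map_of_mem hz)
  rw [hC]
  apply le_antisymm
  · rcases PySem.List.foldl_max_mem (t.map cnt) (cnt x) with he | he
    · rw [he]
      exact hmem2 x ((PySem.Set.mem_ofList ls x).mp (hd ▸ List.mem_cons_self))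
    · obtain ⟨z, hz, he2⟩ := List.mem_map.mp he
      rw [← he2]
      exact hmem2 z ((PySem.Set.mem_ofList ls z).mp (hd ▸ List.mem_cons.mpr (Or.inr hz)))
  · rcases PySem.List.foldl_max_mem (ls.map cnt) 0 with he | he
    · rw [he]
      exact le_trans (by positivity) ((PySem.List.le_foldl_max (t.map cnt) (cnt x)).1)
    · obtain ⟨z, hz, he2⟩ := List.mem_map.mp he
      rw [← he2]
      exact hmem1 z ((PySem.Set.mem_ofList ls z).mpr hz)

-- the invariant of A's outer loop: from a state describing processed prefix p, the loop
-- computes the running max of cnt and the set of letters realising it, in first-occurrence order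
theorem pv_A_loop (cnt : String → Int)
    (xs : List String) : ∀ (p : List String) (c : Int), (∀ x ∈ p, cnt x ≤ c) →
    xs.foldl (fun (st : Int × PySem.Set String) l =>
        if cnt l > st.1 then (cnt l, PySem.Set.add PySem.Set.empty l)
        else if cnt l == st.1 then (st.1, PySem.Set.add st.2 l)
        else st)
      (c, PySem.Set.ofList (p.filter (fun x => cnt x == c)))
    = (xs.foldl (fun a x => max a (cnt x)) c,
       PySem.Set.ofList ((p ++ xs).filter
         (fun x => cnt x == xs.foldl (fun a x => max a (cnt x)) c))) := by
  induction xs with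
  | nil => intro p c _; simp
  | cons l t ih =>
      intro p c hle
      have happ : p ++ l :: t = (p ++ [l]) ++ t := by simp
      rw [List.foldl_cons, List.foldl_cons, happ]
      by_cases hgt : cnt l > c
      · have hmax : max c (cnt l) = cnt l := by omega
        have h1 : p.filter (fun x => cnt x == cnt l) = [] := by
          rw [List.filter_eq_nil_iff]
          intro x hx
          have := hle x hx
          simp only [beq_iff_eq]
          intro h; omega
        have hstep : PySem.Set.add PySem.Set.empty l
            = PySem.Set.ofList ((p ++ [l]).filter (fun x => cnt x == cnt l)) := by
          simp [List.filter_append, h1, PySem.Set.ofList, PySem.Set.add, PySem.Set.empty]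
        simp only [if_pos hgt, hmax]
        rw [hstep]
        exact ih (p ++ [l]) (cnt l) (by
          intro x hx
          rcases List.mem_append.mp hx with h | h
          · exact le_of_lt (lt_of_le_of_lt (hle x h) hgt)
          · simp only [List.mem_singleton] at h; subst h; exact le_refl _)
      · have hnext : ∀ x ∈ p ++ [l], cnt x ≤ c := by
          intro x hx
          rcases List.mem_append.mp hx with h | h
          · exact hle x h
          · simp only [List.mem_singleton] at h; subst h; omega
        have hmax : max c (cnt l) = c := by omega
        by_cases heq : cnt l = c
        · have h1 : (p ++ [l]).filter (fun x => cnt x == c)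
              = p.filter (fun x => cnt x == c) ++ [l] := by
            simp [List.filter_append, heq]
          rw [show (if cnt l > c then (cnt l, PySem.Set.add PySem.Set.empty l)
              else if cnt l == c then ((c, PySem.Set.ofList (p.filter (fun x => cnt x == c))).1,
                PySem.Set.add (c, PySem.Set.ofList (p.filter (fun x => cnt x == c))).2 l)
              else (c, PySem.Set.ofList (p.filter (fun x => cnt x == c)))) =
              (c, PySem.Set.ofList ((p ++ [l]).filter (fun x => cnt x == c))) from by
            rw [if_neg hgt, if_pos (beq_iff_eq.mpr heq)]
            rw [h1]
            simp [PySem.Set.ofList_eq_foldl], hmax]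
          exact ih (p ++ [l]) c hnext
        · have h1 : (p ++ [l]).filter (fun x => cnt x == c)
              = p.filter (fun x => cnt x == c) := by
            simp [List.filter_append, beq_eq_false_iff_ne.mpr heq]
          rw [show (if cnt l > c then (cnt l, PySem.Set.add PySem.Set.empty l)
              else if cnt l == c then ((c, PySem.Set.ofList (p.filter (fun x => cnt x == c))).1,
                PySem.Set.add (c, PySem.Set.ofList (p.filter (fun x => cnt x == c))).2 l)
              else (c, PySem.Set.ofList (p.filter (fun x => cnt x == c)))) =
              (c, PySem.Set.ofList ((p ++ [l]).filter (fun x => cnt x == c))) from by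
            rw [if_neg hgt, if_neg (by simp [heq] : ¬ (cnt l == c) = true), h1], hmax]
          exact ih (p ++ [l]) c hnext

-- ===== VERDICT (by name: the statement is the Claim_ definition above) =====
theorem check_fruits_spec : Claim_equal_check_fruits := by
  intro fruits _ _
  unfold Spec_check_fruits
  rcases eq_or_ne fruits [] with rfl | hfne
  · rfl
  unfold check_fruits check_fruits_alt
  simp only []
  set ls := fruits.map pvFirstUpper with hls
  have hlsne : ls ≠ [] := by
    rw [hls]; simpa using hfne
  set cnt : String → Int := fun x => ((ls.count x : Int)) with hcnt
  -- A's inner loop counts the fruits sharing the first letter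
  have hinner : ∀ fruit, fruits.foldl (fun cn fruit2 =>
      if pvFirstUpper fruit == pvFirstUpper fruit2 then cn + 1 else cn) 0
      = cnt (pvFirstUpper fruit) := by
    intro fruit
    rw [PySem.List.foldl_count_if (fun fruit2 => pvFirstUpper fruit == pvFirstUpper fruit2) fruits 0]
    have : List.countP (fun fruit2 => pvFirstUpper fruit == pvFirstUpper fruit2) fruits
        = List.countP (fun y => pvFirstUpper fruit == y) ls := by
      rw [hls, List.countP_map]; rfl
    rw [this, hcnt]
    simp only [List.count, zero_add, Int.natCast_inj]
    apply List.countP_congr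
    intro y _
    rw [(BEq.comm : (pvFirstUpper fruit == y) = (y == pvFirstUpper fruit))]
  -- A's outer loop runs over the list of first letters
  have hA : (fruits.foldl (fun (st : Int × PySem.Set String) fruit =>
      let countNew : Int := fruits.foldl (fun cn fruit2 =>
          if pvFirstUpper fruit == pvFirstUpper fruit2 then cn + 1 else cn) 0
      if countNew > st.1 then (countNew, PySem.Set.add PySem.Set.empty (pvFirstUpper fruit))
      else if countNew == st.1 then (st.1, PySem.Set.add st.2 (pvFirstUpper fruit))
      else st)
    ((0 : Int), (PySem.Set.empty : PySem.Set String)))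
    = ls.foldl (fun (st : Int × PySem.Set String) l =>
        if cnt l > st.1 then (cnt l, PySem.Set.add PySem.Set.empty l)
        else if cnt l == st.1 then (st.1, PySem.Set.add st.2 l)
        else st) ((0 : Int), PySem.Set.empty) := by
    rw [hls, List.foldl_map]
    congr 1
    funext st fruit
    simp only [hinner fruit]
  rw [hA]
  have h0 := pv_A_loop cnt ls [] 0 (by intro x hx; simp at hx)
  simp only [List.filter_nil, List.nil_append] at h0
  rw [show (PySem.Set.ofList ([] : List String)) = PySem.Set.empty from rfl] at h0
  rw [h0]
  -- B: the tally loop is Counter, its values are the counts of the distinct letters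
  rw [PySem.Dict.foldl_insert_getD_add_one_eq_counter ls]
  have hvals : (PySem.Dict.counter ls).values
      = (PySem.Set.ofList ls).map (fun k => ((ls.count k : Int))) := by
    show ((PySem.Dict.counter ls).items).map (·.2) = _
    rw [PySem.Dict.items_counter, List.map_map]
    rfl
  rw [hvals, pv_max_values ls hlsne]
  simp only []
  rw [pv_foldl_add_filter, show (PySem.Set.empty : PySem.Set String) = [] from rfl,
    PySem.Set.update_nil_left]
  congr 1
  apply List.filter_congr
  intro x _
  rw [PySem.Dict.getD_counter]
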